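-- pv_equiv track=rewrite | github.com/mazalkov/CodeSignal | Code Arcade/Intro/Level 10/isBeautifulString.py | solution
-- ===== SOURCE A (Python) =====
-- from collections import Counter
-- import string
--
-- def solution(inputString):
--
--     c = Counter(inputString)
--
--     keys = sorted(c.keys())
--
--     # sort the keys and get the corresponding vals
--     vals = [c[key] for key in keys]
--
--     letters = string.ascii_lowercase
--     LENGTH = len(keys)
--     keys_str = ''.join(keys)
--
--     continuity_check = letters[:LENGTH] == keys_str
--     monotonicity_check = all(x>=y for x, y in zip(vals, vals[1:]))
--
--
--     return continuity_check and monotonicity_check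
-- ===== SOURCE B (Python) =====
-- def solution(inputString):
--     # One pass: tally the 26 lowercase letters in a fixed array, rejecting any
--     # other character immediately; beautiful iff the tallies never increase
--     # from 'a' to 'z'.
--     counts = [0] * 26
--     for ch in inputString:
--         i = ord(ch) - 97
--         if i < 0 or i > 25:
--             return False
--         counts[i] += 1
--     return all(x >= y for x, y in zip(counts, counts[1:]))
-- ===== Notes on version B (the rewrite author's own statement) =====
-- stated objective: simpler
-- what changed: Replaces the Counter + sorted-keys + alphabet-prefix comparison with a single pass that tallies into a fixed 26-slot array (rejecting any non-lowercase character on sight) and then checks the tallies are non-increasing across the whole alphabet, which subsumes A's separate continuity and monotonicity checks.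
import Mathlib
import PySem

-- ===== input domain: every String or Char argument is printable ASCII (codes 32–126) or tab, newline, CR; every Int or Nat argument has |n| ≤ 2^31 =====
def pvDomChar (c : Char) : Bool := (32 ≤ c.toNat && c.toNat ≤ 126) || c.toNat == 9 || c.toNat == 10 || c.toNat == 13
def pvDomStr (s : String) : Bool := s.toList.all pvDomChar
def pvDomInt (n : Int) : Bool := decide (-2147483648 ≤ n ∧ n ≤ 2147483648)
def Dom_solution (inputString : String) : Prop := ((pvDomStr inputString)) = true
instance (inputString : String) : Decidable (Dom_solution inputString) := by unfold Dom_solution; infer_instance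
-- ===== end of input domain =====

-- B replaces A's Counter + sorted-keys + alphabet-prefix comparison with one pass over the
-- string tallying into a fixed 26-slot array and a single non-increasing scan (objective: simpler).


-- ===== PORT A =====
def solution (inputString : String) : Bool :=
  let c := PySem.Dict.counter inputString.toList
  let keys := PySem.List.sorted c.keys (fun x => x) false
  let vals := keys.map (fun key => c.getD key 0)
  let letters := "abcdefghijklmnopqrstuvwxyz".toList
  let LENGTH := keys.length
  let keys_str := PySem.Chars.join [] (keys.map (fun k => [k]))
  let continuity_check := decide (PySem.List.slice letters none (some (LENGTH : Int)) = keys_str)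
  let monotonicity_check := (vals.zip (PySem.List.slice vals (some 1) none)).all (fun p => decide (p.2 ≤ p.1))
  continuity_check && monotonicity_check

-- ===== PORT B =====
-- the for-loop of Source B with its early 'return False': none = returned False
def solutionAltLoop : List Char → List Nat → Option (List Nat)
  | [], counts => some counts
  | ch :: rest, counts =>
      let i : Int := (ch.toNat : Int) - 97
      if i < 0 ∨ 25 < i then none
      else solutionAltLoop rest (counts.set i.toNat (counts[i.toNat]! + 1))

def solution_alt (inputString : String) : Bool :=
  match solutionAltLoop inputString.toList (List.replicate 26 0) with
  | none => false
  | some counts =>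
      (counts.zip (PySem.List.slice counts (some 1) none)).all (fun p => decide (p.2 ≤ p.1))

-- ===== PRECONDITION & SPEC =====
def Spec_solution (inputString : String) (out : Bool) : Prop := out = solution_alt inputString
instance (inputString : String) (out : Bool) : Decidable (Spec_solution inputString out) := by unfold Spec_solution; infer_instance

-- ===== CLAIM (what is proved, stated in full; the proofs are below) =====
def Claim_equal_solution : Prop := ∀ (inputString : String), Dom_solution inputString → Spec_solution inputString (solution inputString)

-- ===== LEMMAS AND PROOFS =====

def pvL : List Char := ['a', 'b', 'c', 'd', 'e', 'f', 'g', 'h', 'i', 'j', 'k', 'l', 'm', 'n', 'o', 'p', 'q', 'r', 's', 't', 'u', 'v', 'w', 'x', 'y', 'z']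

theorem pvL_eq : "abcdefghijklmnopqrstuvwxyz".toList = pvL := by decide

theorem pvL_len : pvL.length = 26 := rfl

theorem pvL_nodup : pvL.Nodup := by decide

theorem pvL_lt : pvL.Pairwise (· < ·) := by decide

theorem pvL_getElem_toNat : ∀ j, (h : j < pvL.length) → pvL[j].toNat = 97 + j := by decide

theorem char_eq_of_toNat (a b : Char) (h : a.toNat = b.toNat) : a = b := by
  apply Char.ext; exact UInt32.toNat_inj.mp h

theorem mem_pvL_iff (c : Char) : c ∈ pvL ↔ 97 ≤ c.toNat ∧ c.toNat ≤ 122 := by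
  constructor
  · intro h; fin_cases h <;> decide
  · rintro ⟨h1, h2⟩
    have hj : c.toNat - 97 < pvL.length := by rw [pvL_len]; omega
    have htn := pvL_getElem_toNat (c.toNat - 97) hj
    have hc : c = pvL[c.toNat - 97] := char_eq_of_toNat _ _ (by omega)
    rw [hc]; exact List.getElem_mem hj

-- the non-increasing scan 'all(x >= y for x, y in zip(xs, xs[1:]))' is a (≥)-chain
theorem monoAll {α : Type} [LinearOrder α] (xs : List α) :
    ((xs.zip (PySem.List.slice xs (some 1) none)).all (fun p => decide (p.2 ≤ p.1)) = true)
      ↔ List.IsChain (fun a b => b ≤ a) xs := by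
  rw [PySem.List.slice_from xs (by norm_num), show ((1:Int).toNat = 1) from rfl]
  induction xs with
  | nil => simp
  | cons a t ih =>
    cases t with
    | nil => simp
    | cons b u =>
      rw [show List.drop 1 (a :: b :: u) = b :: u from rfl]
      rw [show List.drop 1 (b :: u) = u from rfl] at ih
      rw [List.zip_cons_cons, List.all_cons, List.isChain_cons_cons, ← ih,
          Bool.and_eq_true, decide_eq_true_eq]

-- all-zero tallies trivially form a (≥)-chain
theorem isChain_of_all_zero {f : Char → Nat} (l : List Char) (h : ∀ c ∈ l, f c = 0) :
    List.IsChain (fun a b => f b ≤ f a) l := by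
  have hp : List.Pairwise (fun a b => f b ≤ f a) l :=
    List.pairwise_of_forall_mem_list (fun a _ b hb => by rw [h b hb]; exact Nat.zero_le _)
  exact hp.isChain

-- a non-increasing tally makes 'the letters that occur' a prefix of the alphabet
theorem filter_eq_take {f : Char → Nat} : ∀ (l : List Char),
    l.Pairwise (fun a b => f b ≤ f a) →
    l.filter (fun c => decide (f c ≠ 0)) = l.take (l.filter (fun c => decide (f c ≠ 0))).length := by
  intro l
  induction l with
  | nil => simp
  | cons a t ih =>
    intro hp
    rw [List.pairwise_cons] at hp
    by_cases ha : f a = 0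
    · have ht : List.filter (fun c => decide (f c ≠ 0)) t = [] := by
        rw [List.filter_eq_nil_iff]
        intro b hb
        have hb0 : f b = 0 := Nat.le_zero.mp (ha ▸ hp.1 b hb)
        simp [hb0]
      rw [List.filter_cons_of_neg (by simp [ha]), ht]
      rfl
    · rw [List.filter_cons_of_pos (by simp [ha])]
      simp only [List.length_cons, List.take_succ_cons]
      exact congrArg (List.cons a) (ih hp.2)

theorem zipWith_add_zero : ∀ (acc : List Nat) (l : List Char),
    acc.length = l.length → List.zipWith (· + ·) acc (l.map (fun _ => 0)) = acc := by
  intro acc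
  induction acc with
  | nil => intro l _; simp
  | cons a t ih =>
    intro l h
    cases l with
    | nil => simp at h
    | cons b u => simpa using ih u (by simpa using h)

theorem zipWith_zero_add : ∀ (v : List Nat), List.zipWith (· + ·) (List.replicate v.length 0) v = v := by
  intro v
  induction v with
  | nil => rfl
  | cons a t ih => simpa [List.replicate_succ] using ih

theorem loop_none : ∀ (s : List Char) (acc : List Nat),
    (¬ ∀ c ∈ s, 97 ≤ c.toNat ∧ c.toNat ≤ 122) → solutionAltLoop s acc = none := by
  intro s
  induction s with
  | nil => intro acc h; exact absurd (by simp) h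
  | cons c t ih =>
    intro acc h
    by_cases hc : 97 ≤ c.toNat ∧ c.toNat ≤ 122
    · have hcond : ¬ (((c.toNat : Int) - 97) < 0 ∨ 25 < ((c.toNat : Int) - 97)) := by omega
      simp only [solutionAltLoop, if_neg hcond]
      refine ih _ (fun hall => h ?_)
      intro d hd
      rcases List.mem_cons.mp hd with rfl | hd'
      · exact hc
      · exact hall d hd'
    · have hcond : (((c.toNat : Int) - 97) < 0 ∨ 25 < ((c.toNat : Int) - 97)) := by omega
      simp only [solutionAltLoop, if_pos hcond]

theorem loop_some : ∀ (s : List Char) (acc : List Nat),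
    acc.length = 26 → (∀ c ∈ s, 97 ≤ c.toNat ∧ c.toNat ≤ 122) →
    solutionAltLoop s acc = some (List.zipWith (· + ·) acc (pvL.map (fun d => s.count d))) := by
  intro s
  induction s with
  | nil =>
    intro acc hlen _
    simp only [solutionAltLoop, List.count_nil]
    rw [zipWith_add_zero acc pvL (by rw [hlen, pvL_len])]
  | cons c t ih =>
    intro acc hlen hall
    have hc : 97 ≤ c.toNat ∧ c.toNat ≤ 122 := hall c List.mem_cons_self
    have hcond : ¬ (((c.toNat : Int) - 97) < 0 ∨ 25 < ((c.toNat : Int) - 97)) := by omega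
    have hiN : ((c.toNat : Int) - 97).toNat = c.toNat - 97 := by omega
    set iN := c.toNat - 97 with hiNdef
    have hiNlt : iN < 26 := by omega
    simp only [solutionAltLoop, if_neg hcond, hiN]
    rw [ih _ (by simp [hlen]) (fun d hd => hall d (List.mem_cons_of_mem _ hd))]
    congr 1
    apply List.ext_getElem
    · simp [hlen]
    · intro j h1 h2
      have hj : j < 26 := by
        simp only [List.length_zipWith, List.length_map, List.length_set, hlen, pvL_len] at h1
        omega
      have hpv : j < pvL.length := by rw [pvL_len]; exact hj
      rw [List.getElem_zipWith, List.getElem_zipWith, List.getElem_map, List.getElem_map,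
          List.getElem_set, List.count_cons]
      have htoNat : (pvL[j]'hpv).toNat = 97 + j := pvL_getElem_toNat j hpv
      by_cases hji : iN = j
      · subst hji
        have hceq : (c == pvL[iN]'hpv) = true := by
          rw [beq_iff_eq]; exact char_eq_of_toNat _ _ (by omega)
        have hb : acc[iN]! = acc[iN]'(by omega) := getElem!_pos acc iN (by omega)
        simp only [hceq, hb, if_true]
        omega
      · have hcne : (c == pvL[j]'hpv) = false := by
          rw [beq_eq_false_iff_ne]
          intro hEq
          have := congrArg Char.toNat hEq
          omega
        rw [if_neg hji, hcne]
        simp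

-- ===== VERDICT (by name: the statement is the Claim_ definition above) =====
theorem solution_spec : Claim_equal_solution := by
  intro inputString _
  unfold Spec_solution
  simp only [solution, solution_alt]
  rw [PySem.Dict.keys_counter]
  generalize inputString.toList = s
  set K := PySem.List.sorted (PySem.Set.ofList s) (fun x => x) false with hK
  have hKmem : ∀ c, c ∈ K ↔ c ∈ s := by
    intro c; rw [hK, PySem.List.mem_sorted, PySem.Set.mem_ofList]
  have hTrans : Trans (fun a b : Char => s.count b ≤ s.count a)
      (fun a b : Char => s.count b ≤ s.count a) (fun a b : Char => s.count b ≤ s.count a) :=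
    ⟨fun h1 h2 => le_trans h2 h1⟩
  rw [PySem.Chars.join_nil_singletons,
      PySem.List.slice_to _ (by positivity), Int.toNat_natCast, pvL_eq]
  by_cases hlow : ∀ c ∈ s, 97 ≤ c.toNat ∧ c.toNat ≤ 122
  · -- every character is a lowercase letter
    simp only [loop_some s (List.replicate 26 0) (by rfl) hlow]
    rw [show (List.replicate 26 (0:Nat)) = List.replicate (pvL.map (fun d => s.count d)).length 0 by
          rw [List.length_map, pvL_len],
        zipWith_zero_add]
    have hB : (((pvL.map (fun d => s.count d)).zip
          (PySem.List.slice (pvL.map (fun d => s.count d)) (some 1) none)).all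
          (fun p => decide (p.2 ≤ p.1)) = true)
        ↔ List.IsChain (fun a b : Char => s.count b ≤ s.count a) pvL := by
      rw [monoAll, List.isChain_map]
    have hvals : K.map (fun key => (PySem.Dict.counter s).getD key 0)
        = K.map (fun key => ((s.count key : Nat) : Int)) :=
      List.map_congr_left (fun k _ => PySem.Dict.getD_counter s k)
    have hA : (((K.map (fun key => (PySem.Dict.counter s).getD key 0)).zip
          (PySem.List.slice (K.map (fun key => (PySem.Dict.counter s).getD key 0)) (some 1) none)).all
          (fun p => decide (p.2 ≤ p.1)) = true)
        ↔ List.IsChain (fun a b : Char => s.count b ≤ s.count a) K := by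
      rw [hvals, monoAll, List.isChain_map]
      constructor
      · intro h; exact h.imp (fun a b hab => by exact_mod_cast hab)
      · intro h; exact h.imp (fun a b hab => by exact_mod_cast hab)
    rcases Bool.eq_false_or_eq_true (decide (pvL.take K.length = K)) with hcont | hcont
    · -- A's continuity check holds: K is exactly the first K.length letters
      rw [hcont, Bool.true_and]
      have htake : pvL.take K.length = K := of_decide_eq_true hcont
      rw [Bool.eq_iff_iff, hA, hB]
      constructor
      · intro hchainK
        rw [show pvL = K ++ pvL.drop K.length from by
              conv_lhs => rw [← List.take_append_drop K.length pvL]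
              rw [htake],
            List.isChain_append]
        have hzero : ∀ d ∈ pvL.drop K.length, s.count d = 0 := by
          intro d hd
          have hdisj := List.disjoint_take_drop (l := pvL) pvL_nodup (le_refl K.length)
          have hdK : d ∉ K := fun hmem => hdisj (by rw [htake]; exact hmem) hd
          exact List.count_eq_zero.mpr (fun hds => hdK ((hKmem d).mpr hds))
        refine ⟨hchainK, isChain_of_all_zero _ hzero, ?_⟩
        intro x _ y hy
        rw [hzero y (List.mem_of_mem_head? hy)]
        exact Nat.zero_le _
      · intro hchainL
        exact hchainL.sublist (htake ▸ List.take_sublist _ _)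
    · -- A's continuity check fails, so some tally must increase: B's chain fails too
      rw [hcont, Bool.false_and]
      symm
      rw [← Bool.not_eq_true, hB]
      intro hchain
      have hpw : List.Pairwise (fun a b : Char => s.count b ≤ s.count a) pvL :=
        (@List.isChain_iff_pairwise _ _ _ hTrans).mp hchain
      have hKF : K = pvL.filter (fun c => decide (s.count c ≠ 0)) := by
        rw [hK]
        apply PySem.List.sorted_eq_of_perm_of_pairwise_lt
        · rw [List.perm_ext_iff_of_nodup (pvL_nodup.filter _) (PySem.Set.nodup_ofList s)]
          intro c
          rw [PySem.Set.mem_ofList, List.mem_filter]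
          constructor
          · rintro ⟨_, hc⟩
            simp only [decide_eq_true_eq] at hc
            exact List.count_pos_iff.mp (Nat.pos_of_ne_zero hc)
          · intro hc
            refine ⟨(mem_pvL_iff c).mpr (hlow c hc), ?_⟩
            simp only [decide_eq_true_eq]
            have := List.count_pos_iff.mpr hc
            omega
        · exact pvL_lt.filter _
      have htake : pvL.take K.length = K := by
        rw [hKF]; exact (filter_eq_take pvL hpw).symm
      exact absurd htake (of_decide_eq_false hcont)
  · -- some character is not a lowercase letter: both sides are false
    simp only [loop_none s _ hlow]
    push Not at hlow
    obtain ⟨c, hcs, hcbad⟩ := hlow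
    have hcfalse : (decide (pvL.take K.length = K)) = false := by
      rw [decide_eq_false_iff_not]
      intro hEq
      have hcK : c ∈ K := (hKmem c).mpr hcs
      have hcpv : c ∈ pvL := by
        rw [← hEq] at hcK
        exact List.mem_of_mem_take hcK
      exact absurd ((mem_pvL_iff c).mp hcpv) (by omega)
    rw [hcfalse, Bool.false_and]
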